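-- pv_equiv track=rewrite | github.com/socathie/CodeFights | Tournaments/arrayEqualization.py | arrayEqualization
-- ===== SOURCE A (Python) =====
-- def arrayEqualization(a, k):
--
--     best = len(a)
--
--     for i in range(len(a)):
--         x = a[i]
--         ans = 0
--         cur = -1
--         for j in range(len(a)):
--             if cur == -1 and a[j] != x:
--                 cur = 0
--             if cur >= 0:
--                 cur += 1
--             if cur == k or cur >= 0 and j == len(a) - 1:
--                 ans += 1
--                 cur = -1
--         best = min(best, ans)
--
--     return best
-- ===== SOURCE B (Python) =====
-- def arrayEqualization(a, k):
--     # Index the occurrences of each value once, then count replacement blocks per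
--     # candidate from the gaps between its occurrences in closed form (ceil division).
--     n = len(a)
--     occ = {}
--     for j, v in enumerate(a):
--         occ.setdefault(v, []).append(j)
--     best = n
--     for x, ps in occ.items():
--         ans = 0
--         bound = -1   # highest index covered by blocks placed so far
--         prev = -1    # last seen occurrence of x
--         for p in ps + [n]:
--             start = max(prev + 1, bound + 1)
--             e = p - 1
--             if start <= e:
--                 m = -((start - e - 1) // k)   # ceil((e - start + 1) / k)
--                 ans += m
--                 bound = start + m * k - 1
--             prev = p
--         best = min(best, ans)
--     return best
-- ===== Notes on version B (the rewrite author's own statement) =====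
-- stated objective: faster
-- what changed: B builds a value-to-occurrence-positions index of the array in one pass and, for each distinct value, counts the replacement blocks from the gaps between consecutive occurrences in closed form with ceiling division, instead of A's per-candidate counter state machine that re-scans the whole array for every (possibly repeated) element.
-- outside the precondition, e.g. on arrayEqualization([0, 1, 2], 0): A returns 1, B raises ZeroDivisionError; on arrayEqualization([0, 1, 2], -1): A returns 1, B returns -2
import Mathlib
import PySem

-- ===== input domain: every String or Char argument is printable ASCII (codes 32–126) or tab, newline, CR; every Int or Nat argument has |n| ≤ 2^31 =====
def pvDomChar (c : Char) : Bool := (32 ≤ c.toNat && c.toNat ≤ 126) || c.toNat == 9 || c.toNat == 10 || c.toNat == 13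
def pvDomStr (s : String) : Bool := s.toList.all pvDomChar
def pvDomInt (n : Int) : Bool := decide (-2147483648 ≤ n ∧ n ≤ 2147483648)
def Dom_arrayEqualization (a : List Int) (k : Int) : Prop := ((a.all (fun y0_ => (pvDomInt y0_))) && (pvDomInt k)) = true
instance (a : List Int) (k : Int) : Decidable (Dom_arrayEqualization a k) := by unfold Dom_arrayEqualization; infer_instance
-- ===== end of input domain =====

-- B indexes each value's occurrence positions once and counts replacement blocks per distinct
-- value from the gaps between occurrences in closed form (ceiling division); measured faster than A.

-- ===== PORT A =====
def arrayEqualization (a : List Int) (k : Int) : Int :=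
  a.foldl (fun best x =>
    let st := (PySem.List.enumerate a 0).foldl (fun (st : Int × Int) jv =>
      let cur := if st.2 = -1 ∧ jv.2 ≠ x then 0 else st.2
      let cur := if cur ≥ 0 then cur + 1 else cur
      if cur = k ∨ (cur ≥ 0 ∧ jv.1 = (a.length : Int) - 1) then (st.1 + 1, (-1 : Int))
      else (st.1, cur)) ((0 : Int), (-1 : Int))
    min best st.1) (a.length : Int)

-- ===== PORT B =====
def arrayEqualization_alt (a : List Int) (k : Int) : Int :=
  let n : Int := (a.length : Int)
  let occ : PySem.Dict Int (List Int) :=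
    (PySem.List.enumerate a 0).foldl
      (fun d jv => d.modify jv.2 [] (· ++ [jv.1])) PySem.Dict.empty
  occ.items.foldl (fun best xps =>
    let st := (xps.2 ++ [n]).foldl (fun (st : Int × Int × Int) p =>
      let start := max (st.2.2 + 1) (st.2.1 + 1)
      let e := p - 1
      if start ≤ e then
        let m := -(PySem.Int.floordiv (start - e - 1) k)
        (st.1 + m, start + m * k - 1, p)
      else (st.1, st.2.1, p)) ((0 : Int), (-1 : Int), (-1 : Int))
    min best st.1) n

-- ===== PRECONDITION & SPEC =====
-- Pre_ excludes non-positive k, where a length-k replacement block is meaningless (the task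
-- assumes k ≥ 1): A's sentinel counter returns an accidental value there, while B's ceiling
-- division raises ZeroDivisionError (k = 0) or produces a meaningless negative count (k < 0).
def Pre_arrayEqualization (a : List Int) (k : Int) : Prop := 1 ≤ k
instance (a : List Int) (k : Int) : Decidable (Pre_arrayEqualization a k) := by
  unfold Pre_arrayEqualization; infer_instance

def pvWitness_arrayEqualization : List Int × Int := ([0, 1, 0, 2], 2)

def Spec_arrayEqualization (a : List Int) (k : Int) (out : Int) : Prop := out = arrayEqualization_alt a k
instance (a : List Int) (k : Int) (out : Int) : Decidable (Spec_arrayEqualization a k out) := by unfold Spec_arrayEqualization; infer_instance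

-- ===== CLAIM (what is proved, stated in full; the proofs are below) =====
def Claim_equal_arrayEqualization : Prop := ∀ (a : List Int) (k : Int), Dom_arrayEqualization a k → Pre_arrayEqualization a k → Spec_arrayEqualization a k (arrayEqualization a k)

-- ===== LEMMAS AND PROOFS =====

-- A's inner loop as a structural recursion: the j == len(a)-1 test becomes "remaining tail empty".
def pvRunA (x k : Int) : List Int → (Int × Int) → (Int × Int)
  | [], st => st
  | v :: t, st =>
    let c1 := if st.2 = -1 ∧ v ≠ x then 0 else st.2
    let c2 := if c1 ≥ 0 then c1 + 1 else c1
    if c2 = k ∨ (c2 ≥ 0 ∧ t = []) then pvRunA x k t (st.1 + 1, -1) else pvRunA x k t (st.1, c2)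

-- reference greedy block count over the array suffix
def pvGreedy (x k : Int) : List Int → Int
  | [] => 0
  | v :: t => if v = x then pvGreedy x k t else 1 + pvGreedy x k (t.drop (k - 1).toNat)
termination_by l => l.length
decreasing_by
  simp_wf
  simp only [List.length_cons, List.length_drop]
  omega

-- mismatch positions of the suffix t, absolute start index j
def pvPos (x : Int) (j : Int) : List Int → List Int
  | [] => []
  | v :: t => if v ≠ x then j :: pvPos x (j + 1) t else pvPos x (j + 1) t

-- occurrence positions of x in the suffix t, absolute start index j
def pvOcc (x : Int) (j : Int) : List Int → List Int
  | [] => []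
  | v :: t => if v = x then j :: pvOcc x (j + 1) t else pvOcc x (j + 1) t

-- the run s, s+1, …, s+g-1 of consecutive integers
def pvRun : Int → Nat → List Int
  | _, 0 => []
  | s, g + 1 => s :: pvRun (s + 1) g

-- greedy interval cover counted over a sorted position list with a coverage bound
def pvCovP (k bound : Int) : List Int → Int
  | [] => 0
  | q :: qs => if q ≤ bound then pvCovP k bound qs else 1 + pvCovP k (q + k - 1) qs

-- B's ceiling  ceil((e - start + 1)/k)  as Python computes it
def pvCeil (k start e : Int) : Int := -(PySem.Int.floordiv (start - e - 1) k)

-- B's inner step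
def pvStep (k : Int) (st : Int × Int × Int) (p : Int) : Int × Int × Int :=
  let start := max (st.2.2 + 1) (st.2.1 + 1)
  let e := p - 1
  if start ≤ e then
    let m := -(PySem.Int.floordiv (start - e - 1) k)
    (st.1 + m, start + m * k - 1, p)
  else (st.1, st.2.1, p)

theorem pvCeil_bounds (k start e : Int) (hk : 0 < k) :
    (pvCeil k start e - 1) * k < e - start + 1 ∧ e - start + 1 ≤ pvCeil k start e * k := by
  have h : start - e - 1 = -(e - start + 1) := by ring
  unfold pvCeil
  rw [h]
  exact (PySem.Int.neg_floordiv_neg_eq_iff_of_pos hk).mp rfl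

theorem pvCeil_eq (k start e q : Int) (hk : 0 < k)
    (h1 : (q - 1) * k < e - start + 1) (h2 : e - start + 1 ≤ q * k) :
    pvCeil k start e = q := by
  have h : start - e - 1 = -(e - start + 1) := by ring
  unfold pvCeil
  rw [h]
  exact (PySem.Int.neg_floordiv_neg_eq_iff_of_pos hk).mpr ⟨h1, h2⟩

theorem pvRun_snoc : ∀ (g : Nat) (s : Int), pvRun s (g + 1) = pvRun s g ++ [s + (g : Int)] := by
  intro g
  induction g with
  | zero => intro s; simp [pvRun]
  | succ g ih =>
    intro s
    show s :: pvRun (s + 1) (g + 1) = (s :: pvRun (s + 1) g) ++ [s + ((g : Int) + 1)]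
    rw [ih (s + 1)]
    simp
    ring_nf

-- cover cost of a consecutive run of g mismatches starting at s, in closed form
theorem pvGap (k : Int) (hk : 1 ≤ k) : ∀ (g : Nat) (s bound : Int) (rest : List Int),
    pvCovP k bound (pvRun s g ++ rest)
      = if max s (bound + 1) ≤ s + (g : Int) - 1 then
          pvCeil k (max s (bound + 1)) (s + (g : Int) - 1)
            + pvCovP k (max s (bound + 1) + pvCeil k (max s (bound + 1)) (s + (g : Int) - 1) * k - 1) rest
        else pvCovP k bound rest := by
  intro g
  induction g with
  | zero =>
    intro s bound rest
    rw [if_neg (by omega)]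
    simp [pvRun]
  | succ g ih =>
    intro s bound rest
    show pvCovP k bound (s :: (pvRun (s + 1) g ++ rest)) = _
    by_cases hb : s ≤ bound
    · rw [show pvCovP k bound (s :: (pvRun (s + 1) g ++ rest)) = pvCovP k bound (pvRun (s + 1) g ++ rest) from by simp [pvCovP, hb]]
      rw [ih (s + 1) bound rest]
      have hmax1 : max (s + 1) (bound + 1) = max s (bound + 1) := by omega
      have he : s + 1 + (g : Int) - 1 = s + ((g : Nat) + 1 : Int) - 1 := by ring
      rw [hmax1, he]
      norm_cast
    · rw [show pvCovP k bound (s :: (pvRun (s + 1) g ++ rest)) = 1 + pvCovP k (s + k - 1) (pvRun (s + 1) g ++ rest) from by simp [pvCovP, hb]]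
      rw [ih (s + 1) (s + k - 1) rest]
      push_cast
      have hmaxs : max s (bound + 1) = s := by omega
      have hmaxk : max (s + 1) (s + k - 1 + 1) = s + k := by omega
      rw [hmaxk, hmaxs, if_pos (show s ≤ s + ((g : Int) + 1) - 1 from by omega)]
      by_cases hkg : s + k ≤ s + 1 + (g : Int) - 1
      · rw [if_pos hkg]
        -- inner ceiling m' and outer ceiling m = m' + 1
        obtain ⟨h1, h2⟩ := pvCeil_bounds k (s + k) (s + 1 + (g : Int) - 1) (by omega)
        have hm : pvCeil k s (s + ((g : Int) + 1) - 1) = pvCeil k (s + k) (s + 1 + (g : Int) - 1) + 1 := by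
          apply pvCeil_eq _ _ _ _ (by omega)
          · have e1 : (pvCeil k (s + k) (s + 1 + (g : Int) - 1) + 1 - 1) * k
                = (pvCeil k (s + k) (s + 1 + (g : Int) - 1) - 1) * k + k := by ring
            rw [e1]; omega
          · have e2 : (pvCeil k (s + k) (s + 1 + (g : Int) - 1) + 1) * k
                = pvCeil k (s + k) (s + 1 + (g : Int) - 1) * k + k := by ring
            rw [e2]; omega
        rw [hm]
        have hbd : s + k + pvCeil k (s + k) (s + 1 + (g : Int) - 1) * k - 1
            = s + (pvCeil k (s + k) (s + 1 + (g : Int) - 1) + 1) * k - 1 := by ring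
        rw [hbd]
        ring
      · rw [if_neg hkg]
        have hm : pvCeil k s (s + ((g : Int) + 1) - 1) = 1 :=
          pvCeil_eq _ _ _ _ (by omega) (by ring_nf; omega) (by ring_nf; omega)
        rw [hm]
        norm_num

-- B's fold over occurrences + sentinel computes the greedy cover of the mismatch positions
theorem pvMain (x k : Int) (hk : 1 ≤ k) : ∀ (t : List Int) (j : Int) (g : Nat) (bound ans : Int),
    ((pvOcc x j t ++ [j + (t.length : Int)]).foldl (pvStep k) (ans, bound, j - 1 - (g : Int))).1
      = ans + pvCovP k bound (pvRun (j - (g : Int)) g ++ pvPos x j t) := by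
  intro t
  induction t with
  | nil =>
    intro j g bound ans
    show (pvStep k (ans, bound, j - 1 - (g : Int)) (j + 0)).1 = _
    rw [pvGap k hk g (j - (g : Int)) bound (pvPos x j [])]
    show (pvStep k (ans, bound, j - 1 - (g : Int)) (j + 0)).1 = _
    unfold pvStep
    have h1 : j - 1 - (g : Int) + 1 = j - (g : Int) := by omega
    have h2 : j + 0 - 1 = j - (g : Int) + (g : Int) - 1 := by omega
    simp only [h1, h2]
    split_ifs with h
    · show ans + pvCeil k _ _ = _
      simp [pvPos, pvCovP]
    · simp [pvPos, pvCovP]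
  | cons v t ih =>
    intro j g bound ans
    have hlen : j + ((v :: t).length : Int) = (j + 1) + (t.length : Int) := by
      simp only [List.length_cons]; push_cast; ring
    by_cases hv : v = x
    · rw [show pvOcc x j (v :: t) = j :: pvOcc x (j + 1) t from by simp [pvOcc, hv]]
      rw [show pvPos x j (v :: t) = pvPos x (j + 1) t from by simp [pvPos, hv]]
      rw [List.cons_append, List.foldl_cons, hlen]
      rw [pvGap k hk g (j - (g : Int)) bound (pvPos x (j + 1) t)]
      have hstep : pvStep k (ans, bound, j - 1 - (g : Int)) j
          = if max (j - (g : Int)) (bound + 1) ≤ j - 1 then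
              (ans + pvCeil k (max (j - (g : Int)) (bound + 1)) (j - 1),
               max (j - (g : Int)) (bound + 1) + pvCeil k (max (j - (g : Int)) (bound + 1)) (j - 1) * k - 1, j)
            else (ans, bound, j) := by
        unfold pvStep pvCeil
        have h1 : j - 1 - (g : Int) + 1 = j - (g : Int) := by omega
        simp only [h1]
      rw [hstep]
      have he : j - (g : Int) + (g : Int) - 1 = j - 1 := by omega
      rw [he]
      split_ifs with h
      · have := ih (j + 1) 0 (max (j - (g : Int)) (bound + 1) + pvCeil k (max (j - (g : Int)) (bound + 1)) (j - 1) * k - 1) (ans + pvCeil k (max (j - (g : Int)) (bound + 1)) (j - 1))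
        simp only [Nat.cast_zero] at this
        rw [show (j + 1 : Int) - 1 - 0 = j from by ring] at this
        rw [this]
        rw [show (j + 1 : Int) - 0 = j + 1 from by ring]
        show _ = ans + (pvCeil k _ _ + pvCovP k _ (pvPos x (j + 1) t))
        simp [pvRun]
        ring_nf
      · have := ih (j + 1) 0 bound ans
        simp only [Nat.cast_zero] at this
        rw [show (j + 1 : Int) - 1 - 0 = j from by ring] at this
        rw [this]
        rw [show (j + 1 : Int) - 0 = j + 1 from by ring]
        simp [pvRun]
    · rw [show pvOcc x j (v :: t) = pvOcc x (j + 1) t from by simp [pvOcc, hv]]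
      rw [show pvPos x j (v :: t) = j :: pvPos x (j + 1) t from by simp [pvPos, hv]]
      rw [hlen]
      have := ih (j + 1) (g + 1) bound ans
      push_cast at this
      rw [show (j + 1 : Int) - 1 - ((g : Int) + 1) = j - 1 - (g : Int) from by ring] at this
      rw [show (j + 1 : Int) - ((g : Int) + 1) = j - (g : Int) from by ring] at this
      rw [this, pvRun_snoc g (j - (g : Int))]
      rw [show j - (g : Int) + (g : Int) = j from by ring]
      simp

-- the greedy position cover equals pvGreedy on the uncovered suffix
theorem pvCovP_pos (x k : Int) : ∀ (t : List Int) (j bound : Int),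
    pvCovP k bound (pvPos x j t) = pvGreedy x k (t.drop (bound - j + 1).toNat) := by
  intro t
  induction t with
  | nil => intro j bound; simp [pvPos, pvCovP, pvGreedy]
  | cons v t ih =>
    intro j bound
    by_cases hv : v = x
    · rw [show pvPos x j (v :: t) = pvPos x (j + 1) t from by simp [pvPos, hv]]
      rw [ih (j + 1) bound]
      by_cases hbj : j ≤ bound
      · have e : (bound - j + 1).toNat = (bound - (j + 1) + 1).toNat + 1 := by omega
        rw [e, List.drop_succ_cons]
      · have e1 : (bound - j + 1).toNat = 0 := by omega
        have e2 : (bound - (j + 1) + 1).toNat = 0 := by omega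
        rw [e1, e2]
        simp [pvGreedy, hv]
    · rw [show pvPos x j (v :: t) = j :: pvPos x (j + 1) t from by simp [pvPos, hv]]
      by_cases hbj : j ≤ bound
      · rw [show pvCovP k bound (j :: pvPos x (j + 1) t) = pvCovP k bound (pvPos x (j + 1) t) from by simp [pvCovP, hbj]]
        rw [ih (j + 1) bound]
        have e : (bound - j + 1).toNat = (bound - (j + 1) + 1).toNat + 1 := by omega
        rw [e, List.drop_succ_cons]
      · rw [show pvCovP k bound (j :: pvPos x (j + 1) t) = 1 + pvCovP k (j + k - 1) (pvPos x (j + 1) t) from by simp [pvCovP, hbj]]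
        rw [ih (j + 1) (j + k - 1)]
        have e1 : (bound - j + 1).toNat = 0 := by omega
        have e2 : (j + k - 1 - (j + 1) + 1).toNat = (k - 1).toNat := by omega
        rw [e1, e2]
        simp [pvGreedy, hv]

-- B's inner loop for one candidate
theorem pvInnerB (a : List Int) (x k : Int) (hk : 1 ≤ k) :
    ((pvOcc x 0 a ++ [(a.length : Int)]).foldl (pvStep k) (0, -1, -1)).1 = pvGreedy x k a := by
  have := pvMain x k hk a 0 0 (-1) 0
  simp only [Nat.cast_zero] at this
  rw [show (0 : Int) - 1 - 0 = -1 from by ring, show (0 : Int) - 0 = 0 from by ring] at this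
  rw [show (0 : Int) + (a.length : Int) = (a.length : Int) from by ring] at this
  rw [this]
  rw [show pvRun 0 0 ++ pvPos x 0 a = pvPos x 0 a from by simp [pvRun]]
  rw [pvCovP_pos x k a 0 (-1)]
  norm_num

-- A's loop body: pvRunA_spec lemmas
theorem pvRunA_spec (x k : Int) (hk : 1 ≤ k) (t : List Int) :
    (∀ ans : Int, (pvRunA x k t (ans, -1)).1 = ans + pvGreedy x k t) ∧
    (∀ (ans c : Int), 1 ≤ c → c < k → t ≠ [] →
      (pvRunA x k t (ans, c)).1 = ans + 1 + pvGreedy x k (t.tail.drop (k - c - 1).toNat)) := by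
  induction t with
  | nil =>
    refine ⟨fun ans => by simp [pvRunA, pvGreedy], fun ans c _ _ h => absurd rfl h⟩
  | cons v t ih =>
    constructor
    · intro ans
      by_cases hv : v = x
      · norm_num [pvRunA, pvGreedy, hv]
        rw [if_neg (show ¬(-1 : Int) = k by omega)]
        exact ih.1 ans
      · norm_num [pvRunA, pvGreedy, hv]
        by_cases hk1 : (1 : Int) = k
        · rw [if_pos (Or.inl hk1)]
          rw [ih.1 (ans + 1)]
          have h0 : k.toNat - 1 = 0 := by omega
          rw [h0]
          simp
          ring
        · by_cases ht : t = []
          · subst ht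
            rw [if_pos (Or.inr rfl)]
            simp [pvRunA, pvGreedy]
          · rw [if_neg (by push_neg; exact ⟨hk1, ht⟩)]
            rw [ih.2 ans 1 (by omega) (by omega) ht]
            obtain ⟨w, t', rfl⟩ : ∃ w t', t = w :: t' := by
              cases t with | nil => exact absurd rfl ht | cons w t' => exact ⟨w, t', rfl⟩
            simp only [List.tail_cons]
            have e1 : (k - 1 - 1).toNat = (k - 2).toNat := by omega
            have e2 : k.toNat - 1 = (k - 2).toNat + 1 := by omega
            rw [e1, e2, List.drop_succ_cons]
            ring
    · intro ans c hc1 hck hne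
      have hcm1 : ¬(c = -1 ∧ ¬v = x) := fun h => absurd h.1 (by omega)
      simp only [pvRunA, ne_eq, hcm1, if_false, if_pos (show c ≥ 0 by omega)]
      by_cases hck1 : c + 1 = k
      · rw [if_pos (Or.inl hck1)]
        rw [ih.1 (ans + 1)]
        have h0 : (k - c - 1).toNat = 0 := by omega
        rw [h0]
        simp
      · by_cases ht : t = []
        · subst ht
          rw [if_pos (Or.inr ⟨by omega, rfl⟩)]
          simp [pvRunA, pvGreedy]
        · rw [if_neg (by push_neg; exact ⟨hck1, fun _ => ht⟩)]
          rw [ih.2 ans (c + 1) (by omega) (by omega) ht]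
          obtain ⟨w, t', rfl⟩ : ∃ w t', t = w :: t' := by
            cases t with | nil => exact absurd rfl ht | cons w t' => exact ⟨w, t', rfl⟩
          simp only [List.tail_cons]
          have e1 : (k - (c + 1) - 1).toNat = (k - c - 2).toNat := by omega
          have e2 : (k - c - 1).toNat = (k - c - 2).toNat + 1 := by omega
          rw [e1, e2, List.drop_succ_cons]

-- bridge: A's fold over enumerate = pvRunA
theorem foldA_eq_runA (a : List Int) (x k : Int) :
    ∀ (t : List Int) (s : Int) (st : Int × Int), s + (t.length : Int) = (a.length : Int) →
    (PySem.List.enumerate t s).foldl (fun (st : Int × Int) jv =>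
      let cur := if st.2 = -1 ∧ jv.2 ≠ x then 0 else st.2
      let cur := if cur ≥ 0 then cur + 1 else cur
      if cur = k ∨ (cur ≥ 0 ∧ jv.1 = (a.length : Int) - 1) then (st.1 + 1, (-1 : Int))
      else (st.1, cur)) st = pvRunA x k t st := by
  intro t
  induction t with
  | nil => intro s st _; simp [PySem.List.enumerate_nil, pvRunA]
  | cons v t ih =>
    intro s st h
    have hlen : s + ((t.length : Int) + 1) = (a.length : Int) := by
      simp only [List.length_cons] at h; push_cast at h; omega
    rw [PySem.List.enumerate_cons, List.foldl_cons]
    rw [ih (s + 1) _ (by omega)]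
    have hiff : ((s : Int) = (a.length : Int) - 1) ↔ (t = []) := by
      cases t with
      | nil =>
        simp only [List.length_nil] at hlen
        exact ⟨fun _ => rfl, fun _ => by omega⟩
      | cons w u =>
        simp only [List.length_cons] at hlen
        push_cast at hlen
        constructor
        · intro hs
          exfalso
          have hnn : (0:Int) ≤ (u.length : Int) := by positivity
          omega
        · intro hc
          exact absurd hc (List.cons_ne_nil w u)
    by_cases ht : t = []
    · have hs : (s : Int) = (a.length : Int) - 1 := hiff.mpr ht
      subst ht
      simp [pvRunA, hs]
    · have hs : ¬((s : Int) = (a.length : Int) - 1) := fun hq => ht (hiff.mp hq)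
      simp only [pvRunA, hs, ht, and_false, or_false]
      exact (apply_ite (pvRunA x k t) _ _ _)

-- min-fold facts
theorem foldl_min_bounds (f : Int → Int) (l : List Int) (init : Int) :
    (l.foldl (fun b x => min b (f x)) init ≤ init) ∧
    (∀ x ∈ l, l.foldl (fun b x => min b (f x)) init ≤ f x) ∧
    (l.foldl (fun b x => min b (f x)) init = init ∨
      ∃ x ∈ l, l.foldl (fun b x => min b (f x)) init = f x) := by
  induction l generalizing init with
  | nil => exact ⟨le_refl _, by simp, Or.inl rfl⟩
  | cons y l ih =>
    obtain ⟨h1, h2, h3⟩ := ih (min init (f y))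
    simp only [List.foldl_cons]
    refine ⟨h1.trans (min_le_left _ _), ?_, ?_⟩
    · intro x hx
      rcases List.mem_cons.mp hx with rfl | hx
      · exact h1.trans (min_le_right _ _)
      · exact h2 x hx
    · rcases h3 with h | ⟨x, hx, h⟩
      · rcases min_choice init (f y) with hm | hm
        · exact Or.inl (h.trans hm)
        · exact Or.inr ⟨y, List.mem_cons_self, h.trans hm⟩
      · exact Or.inr ⟨x, List.mem_cons_of_mem _ hx, h⟩

theorem foldl_min_congr_mem (f g : Int → Int) (l₁ l₂ : List Int) (init : Int)
    (hmem : ∀ x, x ∈ l₁ ↔ x ∈ l₂) (hfg : ∀ x ∈ l₁, f x = g x) :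
    l₁.foldl (fun b x => min b (f x)) init = l₂.foldl (fun b x => min b (g x)) init := by
  obtain ⟨a1, a2, a3⟩ := foldl_min_bounds f l₁ init
  obtain ⟨b1, b2, b3⟩ := foldl_min_bounds g l₂ init
  apply le_antisymm
  · rcases b3 with h | ⟨x, hx, h⟩
    · rw [h]; exact a1
    · have hx1 : x ∈ l₁ := (hmem x).mpr hx
      rw [h, ← hfg x hx1]
      exact a2 x hx1
  · rcases a3 with h | ⟨x, hx, h⟩
    · rw [h]; exact b1
    · rw [h, hfg x hx]
      exact b2 x ((hmem x).mp hx)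

-- A as a min-fold of pvGreedy (for 1 ≤ k)
theorem portA_eq (a : List Int) (k : Int) :
    arrayEqualization a k
      = a.foldl (fun best x => min best ((pvRunA x k a (0, -1)).1)) (a.length : Int) := by
  unfold arrayEqualization
  apply PySem.List.foldl_congr_mem
  intro acc x _
  rw [foldA_eq_runA a x k a 0 ((0 : Int), (-1 : Int)) (by omega)]

-- the occurrence dict: getD gives pvOcc
theorem pvOcc_filter (x : Int) : ∀ (t : List Int) (j : Int),
    ((((PySem.List.enumerate t j).map Prod.swap).filter (fun p => p.1 == x)).map (·.2))
      = pvOcc x j t := by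
  intro t
  induction t with
  | nil => intro j; simp [PySem.List.enumerate_nil, pvOcc]
  | cons v t ih =>
    intro j
    rw [PySem.List.enumerate_cons]
    by_cases hv : v = x
    · simp [pvOcc, hv, ih (j + 1)]
    · simp [pvOcc, hv, ih (j + 1)]

theorem occ_getD (a : List Int) (x : Int) :
    (((PySem.List.enumerate a 0).foldl
        (fun (d : PySem.Dict Int (List Int)) jv => d.modify jv.2 [] (· ++ [jv.1]))
        PySem.Dict.empty).getD x []) = pvOcc x 0 a := by
  have hswap : (PySem.List.enumerate a 0).foldl
      (fun (d : PySem.Dict Int (List Int)) jv => d.modify jv.2 [] (· ++ [jv.1])) PySem.Dict.empty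
      = ((PySem.List.enumerate a 0).map Prod.swap).foldl
      (fun (d : PySem.Dict Int (List Int)) p => d.modify p.1 [] (· ++ [p.2])) PySem.Dict.empty := by
    rw [List.foldl_map]
    rfl
  rw [hswap, PySem.Dict.getD_foldl_modify_append, PySem.Dict.getD_empty]
  rw [List.nil_append, pvOcc_filter]

theorem occ_keys (a : List Int) :
    ((PySem.List.enumerate a 0).foldl
        (fun (d : PySem.Dict Int (List Int)) jv => d.modify jv.2 [] (· ++ [jv.1]))
        PySem.Dict.empty).keys = PySem.List.dedup a := by
  rw [PySem.Dict.keys_foldl_modify_key]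
  rw [PySem.Dict.keys_empty, PySem.List.map_snd_enumerate, PySem.List.dedup_eq_ofList]
  rfl

theorem occ_nodup (a : List Int) :
    ((PySem.List.enumerate a 0).foldl
        (fun (d : PySem.Dict Int (List Int)) jv => d.modify jv.2 [] (· ++ [jv.1]))
        PySem.Dict.empty).keys.Nodup := by
  rw [occ_keys]
  rw [PySem.List.dedup_eq_ofList]
  exact PySem.Set.nodup_ofList a

-- B as a min-fold of pvGreedy over the distinct values (for 1 ≤ k)
theorem altB_items (a : List Int) (k : Int) :
    arrayEqualization_alt a k
      = (((PySem.List.enumerate a 0).foldl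
            (fun (d : PySem.Dict Int (List Int)) jv => d.modify jv.2 [] (· ++ [jv.1]))
            PySem.Dict.empty).items).foldl
          (fun best xps => min best (((xps.2 ++ [(a.length : Int)]).foldl (pvStep k) (0, -1, -1)).1))
          (a.length : Int) := rfl

theorem portB_eq (a : List Int) (k : Int) (hk : 1 ≤ k) :
    arrayEqualization_alt a k
      = (PySem.List.dedup a).foldl (fun best x => min best (pvGreedy x k a)) (a.length : Int) := by
  rw [altB_items a k]
  rw [PySem.Dict.items_eq_map_keys _ (occ_nodup a) []]
  rw [occ_keys a, List.foldl_map]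
  apply PySem.List.foldl_congr_mem
  intro acc x _
  rw [occ_getD a x, pvInnerB a x k hk]

-- ===== VERDICT (by name: the statement is the Claim_ definition above) =====
theorem arrayEqualization_spec : Claim_equal_arrayEqualization := by
  intro a k _ hk
  show arrayEqualization a k = arrayEqualization_alt a k
  rw [portA_eq, portB_eq a k hk]
  exact foldl_min_congr_mem _ _ a (PySem.List.dedup a) _
    (fun x => (PySem.List.mem_dedup a x).symm)
    (fun x _ => by simpa using (pvRunA_spec x k hk a).1 0)
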